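-- pv_equiv track=rewrite | github.com/gui18br/sentiment-ms | src/infrastructure/advanced_sentiment_analyzer.py | build_cooccurrence_graph
-- ===== SOURCE A (Python) =====
-- from typing import List, Dict
--
-- def build_cooccurrence_graph(tokens: List[str]):
--
--     graph: Dict[str, Dict[str,int]] = {}
--
--     for i in range(len(tokens)):
--         for j in range(i+1, len(tokens)):
--
--             a = tokens[i]
--             b = tokens[j]
--
--             if a not in graph:
--                 graph[a] = {}
--
--             if b not in graph:
--                 graph[b] = {}
--
--             graph[a][b] = graph[a].get(b,0) + 1
--
--     return graph
-- ===== SOURCE B (Python) =====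
-- from typing import List, Dict
--
--
-- def build_cooccurrence_graph(tokens: List[str]):
--     # Single left-to-right pass: `seen` holds how many times each distinct
--     # token occurred so far; position j contributes seen[a] pairs (a, tokens[j])
--     # at once, grouped by distinct value, instead of re-scanning the suffix for
--     # every i.
--     if len(tokens) < 2:
--         return {}
--     graph: Dict[str, Dict[str, int]] = {t: {} for t in tokens}
--     seen: Dict[str, int] = {}
--     for b in tokens:
--         for a, c in seen.items():
--             inner = graph[a]
--             inner[b] = inner.get(b, 0) + c
--         seen[b] = seen.get(b, 0) + 1
--     return graph
-- ===== Notes on version B (the rewrite author's own statement) =====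
-- stated objective: alternative
-- what changed: A scans all ordered index pairs with a nested loop; B makes one left-to-right pass keeping a running counter of the distinct tokens seen so far (and pre-builds the node keys), adding each position's co-occurrences grouped by distinct preceding token value (O(n*V) for V distinct tokens vs A's O(n^2); same cost when all tokens are distinct).
import Mathlib
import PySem

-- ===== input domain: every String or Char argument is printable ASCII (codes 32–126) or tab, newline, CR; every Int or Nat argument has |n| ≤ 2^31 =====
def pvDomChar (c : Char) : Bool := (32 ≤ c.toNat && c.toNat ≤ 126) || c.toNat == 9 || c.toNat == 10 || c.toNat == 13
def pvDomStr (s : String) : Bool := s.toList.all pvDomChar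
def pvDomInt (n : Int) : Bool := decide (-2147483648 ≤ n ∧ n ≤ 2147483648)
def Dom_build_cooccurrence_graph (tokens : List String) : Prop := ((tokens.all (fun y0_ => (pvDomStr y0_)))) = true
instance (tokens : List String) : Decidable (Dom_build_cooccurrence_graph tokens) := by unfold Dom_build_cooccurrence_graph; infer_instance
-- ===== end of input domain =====

-- B replaces A's nested scan over all index pairs by a single left-to-right pass
-- keeping running counts of the distinct tokens seen so far (objective: alternative).

-- ===== PORT A =====
-- literal transliteration of A: for i in range(n): for j in range(i+1, n): ensure keys, graph[a][b] += 1
def build_cooccurrence_graph (tokens : List String) : List (String × List (String × Int)) :=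
  let n := PySem.List.len tokens
  let graph := (PySem.List.pyRange 0 n 1).foldl (fun graph i =>
      (PySem.List.pyRange (i + 1) n 1).foldl (fun graph j =>
        let a := PySem.List.pyGetD tokens i ""
        let b := PySem.List.pyGetD tokens j ""
        let graph := if graph.contains a then graph else graph.insert a PySem.Dict.empty
        let graph := if graph.contains b then graph else graph.insert b PySem.Dict.empty
        graph.insert a ((graph.getD a PySem.Dict.empty).insert b
          ((graph.getD a PySem.Dict.empty).getD b 0 + 1))) graph)
    (PySem.Dict.empty : PySem.Dict String (PySem.Dict String Int))
  graph.items.map (fun p => (p.1, p.2.items))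

-- ===== PORT B =====
-- literal transliteration of B (Source B): guard, pre-built keys, one pass with a `seen` counter
def build_cooccurrence_graph_alt (tokens : List String) : List (String × List (String × Int)) :=
  if PySem.List.len tokens < 2 then [] else
  let graph := tokens.foldl (fun g t => g.insert t PySem.Dict.empty)
    (PySem.Dict.empty : PySem.Dict String (PySem.Dict String Int))
  let st := tokens.foldl (fun st b =>
      (st.2.items.foldl (fun g ac =>
          g.insert ac.1 ((g.getD ac.1 PySem.Dict.empty).insert b
            ((g.getD ac.1 PySem.Dict.empty).getD b 0 + ac.2))) st.1,
       st.2.insert b (st.2.getD b 0 + 1)))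
    (graph, (PySem.Dict.empty : PySem.Dict String Int))
  st.1.items.map (fun p => (p.1, p.2.items))

-- ===== PRECONDITION & SPEC =====
def Spec_build_cooccurrence_graph (tokens : List String) (out : List (String × List (String × Int))) : Prop := out = build_cooccurrence_graph_alt tokens
instance (tokens : List String) (out : List (String × List (String × Int))) : Decidable (Spec_build_cooccurrence_graph tokens out) := by unfold Spec_build_cooccurrence_graph; infer_instance

-- ===== CLAIM (what is proved, stated in full; the proofs are below) =====
def Claim_equal_build_cooccurrence_graph : Prop := ∀ (tokens : List String), Dom_build_cooccurrence_graph tokens → Spec_build_cooccurrence_graph tokens (build_cooccurrence_graph tokens)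

-- ===== LEMMAS AND PROOFS =====

-- Abbreviations for the two loop bodies, used only by the proofs below.
def pvEns (g : PySem.Dict String (PySem.Dict String Int)) (a : String) :
    PySem.Dict String (PySem.Dict String Int) :=
  if g.contains a then g else g.insert a PySem.Dict.empty

def pvInc (g : PySem.Dict String (PySem.Dict String Int)) (a b : String) (c : Int) :
    PySem.Dict String (PySem.Dict String Int) :=
  g.insert a ((g.getD a PySem.Dict.empty).insert b
    ((g.getD a PySem.Dict.empty).getD b 0 + c))

def pvStep (g : PySem.Dict String (PySem.Dict String Int)) (a b : String) :
    PySem.Dict String (PySem.Dict String Int) :=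
  pvInc (pvEns (pvEns g a) b) a b 1

def pvRow (g : PySem.Dict String (PySem.Dict String Int)) (a : String) (bs : List String) :
    PySem.Dict String (PySem.Dict String Int) :=
  bs.foldl (fun g b => pvStep g a b) g

def pvLoopA : PySem.Dict String (PySem.Dict String Int) → List String →
    PySem.Dict String (PySem.Dict String Int)
  | g, [] => g
  | g, a :: ts => pvLoopA (pvRow g a ts) ts

def pvColStep (g : PySem.Dict String (PySem.Dict String Int)) (s : PySem.Dict String Int)
    (b : String) : PySem.Dict String (PySem.Dict String Int) :=
  s.items.foldl (fun g ac => pvInc g ac.1 b ac.2) g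

def pvLoopB : PySem.Dict String (PySem.Dict String Int) → PySem.Dict String Int →
    List String → PySem.Dict String (PySem.Dict String Int)
  | g, _, [] => g
  | g, s, b :: ts => pvLoopB (pvColStep g s b) (s.insert b (s.getD b 0 + 1)) ts

def pvInit (ts : List String) : PySem.Dict String (PySem.Dict String Int) :=
  ts.foldl (fun g t => g.insert t PySem.Dict.empty) PySem.Dict.empty

def pvSeen (s : PySem.Dict String Int) (ts : List String) : PySem.Dict String Int :=
  ts.foldl (fun d x => d.insert x (d.getD x 0 + 1)) s

def pvAppendCol (g : PySem.Dict String (PySem.Dict String Int)) (us : List String)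
    (t : String) : PySem.Dict String (PySem.Dict String Int) :=
  us.foldl (fun g a => pvStep g a t) g

def pvEnsAll (g : PySem.Dict String (PySem.Dict String Int)) (l : List String) :
    PySem.Dict String (PySem.Dict String Int) :=
  l.foldl pvEns g

-- ---------- dict toolkit ----------

-- two in-place/append inserts at distinct keys commute when the first key is present
theorem pv_insert_comm {ν : Type} (d : PySem.Dict String ν) {a t : String} (v w : ν)
    (ha : d.contains a = true) (hne : a ≠ t) :
    (d.insert a v).insert t w = (d.insert t w).insert a v := by
  have hta : (t == a) = false := by simp; exact fun h => hne h.symm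
  have hat : (a == t) = false := by simp; exact hne
  cases hct : d.contains t with
  | true =>
      apply PySem.Dict.ext
      rw [PySem.Dict.items_insert_of_contains _ _ (by rw [PySem.Dict.contains_insert]; simp [hta, hct]),
          PySem.Dict.items_insert_of_contains _ _ ha,
          PySem.Dict.items_insert_of_contains _ _ (by rw [PySem.Dict.contains_insert]; simp [hat, ha]),
          PySem.Dict.items_insert_of_contains _ _ hct]
      simp only [List.map_map]
      apply List.map_congr_left
      intro p _
      by_cases hpa : p.1 = a
      · simp [Function.comp, hpa, hat]
      · by_cases hpt : p.1 = t
        · simp [Function.comp, hpt, hta]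
        · simp [Function.comp, hpa, hpt]
  | false =>
      apply PySem.Dict.ext
      rw [PySem.Dict.items_insert_of_not_contains _ _ (by rw [PySem.Dict.contains_insert]; simp [hta, hct]),
          PySem.Dict.items_insert_of_contains _ _ ha,
          PySem.Dict.items_insert_of_contains _ _ (by rw [PySem.Dict.contains_insert]; simp [hat, ha]),
          PySem.Dict.items_insert_of_not_contains _ _ hct]
      rw [List.map_append]
      simp only [List.map_cons, List.map_nil, List.append_cancel_left_eq, List.cons.injEq, and_true]
      rw [if_neg (by simp [hta])]

theorem pvEns_contains (g : PySem.Dict String (PySem.Dict String Int)) (a k : String) :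
    (pvEns g a).contains k = (k == a || g.contains k) := by
  unfold pvEns
  by_cases h : g.contains a = true
  · simp only [h, if_true]
    by_cases hk : k = a
    · simp [hk, h]
    · simp [hk]
  · simp only [Bool.not_eq_true] at h
    simp [h, PySem.Dict.contains_insert]

theorem pvEns_of_contains {g : PySem.Dict String (PySem.Dict String Int)} {a : String}
    (h : g.contains a = true) : pvEns g a = g := by simp [pvEns, h]

theorem pvEns_getD (g : PySem.Dict String (PySem.Dict String Int)) (a x : String) :
    (pvEns g a).getD x PySem.Dict.empty = g.getD x PySem.Dict.empty := by
  unfold pvEns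
  by_cases h : g.contains a = true
  · rw [if_pos h]
  · rw [if_neg h, PySem.Dict.getD_insert]
    have hf : g.contains a = false := by revert h; cases g.contains a <;> simp
    by_cases hx : x = a
    · rw [if_pos hx, hx, PySem.Dict.getD_of_not_contains _ _ hf]
    · rw [if_neg hx]

theorem pvInc_contains {g : PySem.Dict String (PySem.Dict String Int)} {a : String}
    (b : String) (c : Int) (k : String) (ha : g.contains a = true) :
    (pvInc g a b c).contains k = g.contains k := by
  rw [pvInc, PySem.Dict.contains_insert]
  by_cases hk : k = a
  · simp [hk, ha]
  · simp [hk]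

theorem pvInc_getD_ne {g : PySem.Dict String (PySem.Dict String Int)} {a k : String}
    (b : String) (c : Int) (hk : k ≠ a) :
    (pvInc g a b c).getD k PySem.Dict.empty = g.getD k PySem.Dict.empty := by
  rw [pvInc, PySem.Dict.getD_insert, if_neg hk]

theorem pvInc_getD_self (g : PySem.Dict String (PySem.Dict String Int)) (a b : String)
    (c : Int) :
    (pvInc g a b c).getD a PySem.Dict.empty =
      (g.getD a PySem.Dict.empty).insert b ((g.getD a PySem.Dict.empty).getD b 0 + c) := by
  rw [pvInc, PySem.Dict.getD_insert, if_pos rfl]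

theorem pvStep_contains (g : PySem.Dict String (PySem.Dict String Int)) (a b k : String) :
    (pvStep g a b).contains k = (k == b || (k == a || g.contains k)) := by
  rw [pvStep, pvInc_contains _ _ _ (by rw [pvEns_contains, pvEns_contains]; simp),
    pvEns_contains, pvEns_contains]

theorem pvStep_getD_ne {g : PySem.Dict String (PySem.Dict String Int)} {a x : String}
    (b : String) (hx : x ≠ a) :
    (pvStep g a b).getD x PySem.Dict.empty = g.getD x PySem.Dict.empty := by
  rw [pvStep, pvInc_getD_ne _ _ hx, pvEns_getD, pvEns_getD]

theorem pvStep_getD_self (g : PySem.Dict String (PySem.Dict String Int)) (a b : String) :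
    (pvStep g a b).getD a PySem.Dict.empty =
      (g.getD a PySem.Dict.empty).insert b ((g.getD a PySem.Dict.empty).getD b 0 + 1) := by
  rw [pvStep, pvInc_getD_self, pvEns_getD, pvEns_getD]

theorem pvStep_inner_mono {g : PySem.Dict String (PySem.Dict String Int)} {x y : String}
    (a b : String) (h : ((g.getD x PySem.Dict.empty).contains y) = true) :
    (((pvStep g a b).getD x PySem.Dict.empty).contains y) = true := by
  by_cases hx : x = a
  · subst hx
    rw [pvStep_getD_self, PySem.Dict.contains_insert]
    simp [h]
  · rw [pvStep_getD_ne _ hx]; exact h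

theorem pvStep_inner_self (g : PySem.Dict String (PySem.Dict String Int)) (a b : String) :
    (((pvStep g a b).getD a PySem.Dict.empty).contains b) = true := by
  rw [pvStep_getD_self, PySem.Dict.contains_insert]; simp

-- ---------- row lemmas ----------

theorem pvRow_cons (g : PySem.Dict String (PySem.Dict String Int)) (a b : String)
    (bs : List String) : pvRow g a (b :: bs) = pvRow (pvStep g a b) a bs := rfl

theorem pvRow_contains_mono {g : PySem.Dict String (PySem.Dict String Int)} {k : String}
    (a : String) (bs : List String) (h : g.contains k = true) :
    (pvRow g a bs).contains k = true := by
  induction bs generalizing g with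
  | nil => exact h
  | cons b bs ih =>
      rw [pvRow_cons]
      exact ih (by rw [pvStep_contains]; simp [h])

theorem pvRow_contains_of_mem {x : String} (g : PySem.Dict String (PySem.Dict String Int))
    (a : String) {bs : List String} (h : x ∈ bs) :
    (pvRow g a bs).contains x = true := by
  induction bs generalizing g with
  | nil => cases h
  | cons b bs ih =>
      rw [pvRow_cons]
      rcases List.mem_cons.mp h with h | h
      · subst h; exact pvRow_contains_mono _ _ (by rw [pvStep_contains]; simp)
      · exact ih _ h

theorem pvRow_contains_a (g : PySem.Dict String (PySem.Dict String Int)) (a : String)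
    {bs : List String} (h : bs ≠ []) : (pvRow g a bs).contains a = true := by
  cases bs with
  | nil => exact absurd rfl h
  | cons b bs =>
      rw [pvRow_cons]
      exact pvRow_contains_mono _ _ (by rw [pvStep_contains]; simp)

theorem pvRow_inner_mono {g : PySem.Dict String (PySem.Dict String Int)} {x y : String}
    (a : String) (bs : List String)
    (h : ((g.getD x PySem.Dict.empty).contains y) = true) :
    (((pvRow g a bs).getD x PySem.Dict.empty).contains y) = true := by
  induction bs generalizing g with
  | nil => exact h
  | cons b bs ih => rw [pvRow_cons]; exact ih (pvStep_inner_mono _ _ h)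

theorem pvRow_inner_of_mem {y : String} (g : PySem.Dict String (PySem.Dict String Int))
    (a : String) {bs : List String} (h : y ∈ bs) :
    (((pvRow g a bs).getD a PySem.Dict.empty).contains y) = true := by
  induction bs generalizing g with
  | nil => cases h
  | cons b bs ih =>
      rw [pvRow_cons]
      rcases List.mem_cons.mp h with h | h
      · subst h; exact pvRow_inner_mono _ _ (pvStep_inner_self _ _ _)
      · exact ih _ h

theorem pvRow_contains_sub {g : PySem.Dict String (PySem.Dict String Int)}
    {a k : String} {bs : List String}
    (h : (pvRow g a bs).contains k = true) :
    g.contains k = true ∨ k = a ∨ k ∈ bs := by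
  induction bs generalizing g with
  | nil => exact Or.inl h
  | cons b bs ih =>
      rw [pvRow_cons] at h
      rcases ih h with h | h | h
      · rw [pvStep_contains] at h
        rcases Bool.or_eq_true_iff.mp h with h | h
        · exact Or.inr (Or.inr (by simp [beq_iff_eq] at h; simp [h]))
        · rcases Bool.or_eq_true_iff.mp h with h | h
          · exact Or.inr (Or.inl (by simpa [beq_iff_eq] using h))
          · exact Or.inl h
      · exact Or.inr (Or.inl h)
      · exact Or.inr (Or.inr (List.mem_cons_of_mem _ h))

-- ---------- loopA lemmas ----------

theorem pvLoopA_contains_mono {g : PySem.Dict String (PySem.Dict String Int)} {k : String}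
    (ts : List String) (h : g.contains k = true) : (pvLoopA g ts).contains k = true := by
  induction ts generalizing g with
  | nil => exact h
  | cons a ts ih => exact ih (pvRow_contains_mono _ _ h)

theorem pvLoopA_contains_sub {g : PySem.Dict String (PySem.Dict String Int)} {k : String}
    {ts : List String} (h : (pvLoopA g ts).contains k = true) :
    g.contains k = true ∨ k ∈ ts := by
  induction ts generalizing g with
  | nil => exact Or.inl h
  | cons a ts ih =>
      rcases ih h with h | h
      · rcases pvRow_contains_sub h with h | h | h
        · exact Or.inl h
        · exact Or.inr (by simp [h])
        · exact Or.inr (List.mem_cons_of_mem _ h)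
      · exact Or.inr (List.mem_cons_of_mem _ h)

theorem pvLoopA_full {us : List String} (h2 : 2 ≤ us.length) :
    ∀ a ∈ us, (pvLoopA PySem.Dict.empty us).contains a = true := by
  match us, h2 with
  | u :: v :: ws, _ =>
    intro a ha
    show (pvLoopA (pvRow PySem.Dict.empty u (v :: ws)) (v :: ws)).contains a = true
    rcases List.mem_cons.mp ha with h | h
    · subst h
      exact pvLoopA_contains_mono _ (pvRow_contains_a _ _ (by simp))
    · exact pvLoopA_contains_mono _ (pvRow_contains_of_mem _ _ h)

-- ---------- the swap: one late column step commutes past rows ----------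

theorem pvInc_comm_ne {g : PySem.Dict String (PySem.Dict String Int)} {a x : String}
    (t y : String) (c c' : Int) (ha : g.contains a = true) (_hx : g.contains x = true)
    (hne : a ≠ x) :
    pvInc (pvInc g a t c) x y c' = pvInc (pvInc g x y c') a t c := by
  unfold pvInc
  rw [PySem.Dict.getD_insert, if_neg (Ne.symm hne), PySem.Dict.getD_insert, if_neg hne]
  exact pv_insert_comm g _ _ ha hne

theorem pvInc_inc_same (g : PySem.Dict String (PySem.Dict String Int)) (x t : String)
    (c : Int) : pvInc (pvInc g x t c) x t 1 = pvInc g x t (c + 1) := by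
  unfold pvInc
  rw [PySem.Dict.getD_insert, if_pos rfl, PySem.Dict.insert_insert_self,
    PySem.Dict.getD_insert, if_pos rfl, PySem.Dict.insert_insert_self]
  ring_nf

theorem pvInc_comm_same {g : PySem.Dict String (PySem.Dict String Int)} {a y : String}
    (t : String) (hy : ((g.getD a PySem.Dict.empty).contains y) = true) :
    pvInc (pvInc g a t 1) a y 1 = pvInc (pvInc g a y 1) a t 1 := by
  by_cases hty : t = y
  · subst hty; rfl
  · unfold pvInc
    rw [PySem.Dict.insert_insert_self, PySem.Dict.insert_insert_self]
    simp only [PySem.Dict.getD_insert, if_true]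
    rw [if_neg (fun h : y = t => hty h.symm), if_neg hty]
    congr 1
    exact (pv_insert_comm _ _ _ hy (fun h => hty h.symm)).symm

theorem pvEns_inc_comm {g : PySem.Dict String (PySem.Dict String Int)} {x : String}
    (y t : String) (c : Int) (hx : g.contains x = true) :
    pvEns (pvInc g x y c) t = pvInc (pvEns g t) x y c := by
  cases hct : g.contains t with
  | true => rw [pvEns_of_contains hct, pvEns_of_contains (by rw [pvInc_contains _ _ _ hx]; exact hct)]
  | false =>
      have hxt : x ≠ t := fun h => by rw [h] at hx; rw [hx] at hct; cases hct
      rw [pvEns, if_neg (by rw [pvInc_contains _ _ _ hx, hct]; simp),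
        pvEns, if_neg (by rw [hct]; simp)]
      unfold pvInc
      rw [PySem.Dict.getD_insert g t x PySem.Dict.empty PySem.Dict.empty, if_neg hxt]
      exact pv_insert_comm g _ _ hx hxt

theorem pvStep_swap {g : PySem.Dict String (PySem.Dict String Int)} {a x y : String}
    (t : String) (ha : g.contains a = true) (hx : g.contains x = true)
    (hy : g.contains y = true) (hya : ((g.getD a PySem.Dict.empty).contains y) = true) :
    pvStep (pvStep g a t) x y = pvStep (pvStep g x y) a t := by
  have hstep_xy : pvStep g x y = pvInc g x y 1 := by
    rw [pvStep, pvEns_of_contains hx,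
      pvEns_of_contains hy]
  have hstep_at : pvStep g a t = pvInc (pvEns g t) a t 1 := by
    rw [pvStep, pvEns_of_contains ha]
  rw [hstep_xy, hstep_at]
  -- left side: resolve the ens's of x and y (present throughout)
  have hx1 : (pvInc (pvEns g t) a t 1).contains x = true := by
    rw [pvInc_contains _ _ _ (by rw [pvEns_contains, ha]; simp), pvEns_contains, hx]; simp
  have hy1 : (pvInc (pvEns g t) a t 1).contains y = true := by
    rw [pvInc_contains _ _ _ (by rw [pvEns_contains, ha]; simp), pvEns_contains, hy]; simp
  rw [pvStep, pvEns_of_contains hx1, pvEns_of_contains hy1]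
  -- right side: ens a is a no-op, and ens t commutes with the x/y increment
  have ha2 : (pvInc g x y 1).contains a = true := by rw [pvInc_contains _ _ _ hx]; exact ha
  rw [pvStep, pvEns_of_contains ha2, pvEns_inc_comm _ _ _ hx]
  by_cases hax : x = a
  · subst hax
    have hya' : (((pvEns g t).getD x PySem.Dict.empty).contains y) = true := by
      rw [pvEns_getD]; exact hya
    exact pvInc_comm_same _ hya'
  · exact pvInc_comm_ne _ _ _ _
      (by rw [pvEns_contains, ha]; simp)
      (by rw [pvEns_contains, hx]; simp) (fun h => hax h.symm)

theorem pvRow_swap {g : PySem.Dict String (PySem.Dict String Int)} {a x : String}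
    {ws : List String} (t : String) (ha : g.contains a = true) (hx : g.contains x = true)
    (hws : ∀ w ∈ ws, g.contains w = true)
    (hin : ∀ w ∈ ws, ((g.getD a PySem.Dict.empty).contains w) = true) :
    pvRow (pvStep g a t) x ws = pvStep (pvRow g x ws) a t := by
  induction ws generalizing g with
  | nil => rfl
  | cons w ws ih =>
      rw [pvRow_cons, pvRow_cons,
        pvStep_swap t ha hx (hws w (by simp)) (hin w (by simp))]
      exact ih (g := pvStep g x w)
        (by rw [pvStep_contains]; simp [ha])
        (by rw [pvStep_contains]; simp)
        (fun v hv => by rw [pvStep_contains]; simp [hws v (List.mem_cons_of_mem _ hv)])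
        (fun v hv => pvStep_inner_mono _ _ (hin v (List.mem_cons_of_mem _ hv)))

theorem pvLoopA_swap {g : PySem.Dict String (PySem.Dict String Int)} {a : String}
    {vs : List String} (t : String) (ha : g.contains a = true)
    (hvs : ∀ v ∈ vs, g.contains v = true)
    (hin : ∀ v ∈ vs, ((g.getD a PySem.Dict.empty).contains v) = true) :
    pvLoopA (pvStep g a t) vs = pvStep (pvLoopA g vs) a t := by
  induction vs generalizing g with
  | nil => rfl
  | cons x ws ih =>
      show pvLoopA (pvRow (pvStep g a t) x ws) ws = pvStep (pvLoopA (pvRow g x ws) ws) a t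
      rw [pvRow_swap t ha (hvs x (by simp))
        (fun w hw => hvs w (List.mem_cons_of_mem _ hw))
        (fun w hw => hin w (List.mem_cons_of_mem _ hw))]
      exact ih (g := pvRow g x ws)
        (pvRow_contains_mono _ _ ha)
        (fun v hv => pvRow_contains_mono _ _ (hvs v (List.mem_cons_of_mem _ hv)))
        (fun v hv => pvRow_inner_mono _ _ (hin v (List.mem_cons_of_mem _ hv)))

-- A's loop on us ++ [t] = A's loop on us, then the whole last column
theorem pvLoopA_append (g : PySem.Dict String (PySem.Dict String Int)) (us : List String)
    (t : String) : pvLoopA g (us ++ [t]) = pvAppendCol (pvLoopA g us) us t := by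
  induction us generalizing g with
  | nil => rfl
  | cons a vs ih =>
      show pvLoopA (pvRow g a (vs ++ [t])) (vs ++ [t]) = _
      rw [show pvRow g a (vs ++ [t]) = pvStep (pvRow g a vs) a t from List.foldl_append .., ih]
      cases vs with
      | nil => rfl
      | cons v ws =>
          rw [pvLoopA_swap t
            (pvRow_contains_a _ _ (by simp))
            (fun w hw => pvRow_contains_of_mem _ _ hw)
            (fun w hw => pvRow_inner_of_mem _ _ hw)]
          rfl

-- ---------- loopB lemmas ----------

theorem pvLoopB_append (g : PySem.Dict String (PySem.Dict String Int))
    (s : PySem.Dict String Int) (us : List String) (t : String) :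
    pvLoopB g s (us ++ [t]) = pvColStep (pvLoopB g s us) (pvSeen s us) t := by
  induction us generalizing g s with
  | nil => rfl
  | cons b us ih => exact ih (pvColStep g s b) (s.insert b (s.getD b 0 + 1))

theorem pvIncFold_contains {l : List (String × Int)} {g : PySem.Dict String (PySem.Dict String Int)}
    (b k : String) (hl : ∀ p ∈ l, g.contains p.1 = true) :
    (l.foldl (fun g ac => pvInc g ac.1 b ac.2) g).contains k = g.contains k := by
  induction l generalizing g with
  | nil => rfl
  | cons p l ih =>
      rw [List.foldl_cons, ih (fun q hq => by
        rw [pvInc_contains _ _ _ (hl p (by simp))]; exact hl q (List.mem_cons_of_mem _ hq)),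
        pvInc_contains _ _ _ (hl p (by simp))]

theorem pvColStep_contains {g : PySem.Dict String (PySem.Dict String Int)}
    {s : PySem.Dict String Int} (b k : String)
    (hs : ∀ p ∈ s.items, g.contains p.1 = true) :
    (pvColStep g s b).contains k = g.contains k :=
  pvIncFold_contains b k hs

theorem pvIncFold_insert_fresh {l : List (String × Int)}
    {g : PySem.Dict String (PySem.Dict String Int)} {t : String} (b : String)
    (hl : ∀ p ∈ l, g.contains p.1 = true) (ht : g.contains t = false) :
    l.foldl (fun g ac => pvInc g ac.1 b ac.2) (g.insert t PySem.Dict.empty) =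
      (l.foldl (fun g ac => pvInc g ac.1 b ac.2) g).insert t PySem.Dict.empty := by
  induction l generalizing g with
  | nil => rfl
  | cons p l ih =>
      have hp : g.contains p.1 = true := hl p (by simp)
      have hpt : p.1 ≠ t := fun h => by rw [h] at hp; rw [hp] at ht; cases ht
      rw [List.foldl_cons, List.foldl_cons,
        show pvInc (g.insert t PySem.Dict.empty) p.1 b p.2 =
          (pvInc g p.1 b p.2).insert t PySem.Dict.empty by
            unfold pvInc
            rw [PySem.Dict.getD_insert, if_neg hpt]
            exact (pv_insert_comm g _ _ hp hpt).symm]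
      exact ih (fun q hq => by
          rw [pvInc_contains _ _ _ hp]; exact hl q (List.mem_cons_of_mem _ hq))
        (by rw [pvInc_contains _ _ _ hp]; exact ht)

theorem pvLoopB_insert_fresh {ts : List String} {g : PySem.Dict String (PySem.Dict String Int)}
    {s : PySem.Dict String Int} {t : String}
    (hs : ∀ p ∈ s.items, g.contains p.1 = true)
    (hts : ∀ x ∈ ts, g.contains x = true) (ht : g.contains t = false) :
    pvLoopB (g.insert t PySem.Dict.empty) s ts =
      (pvLoopB g s ts).insert t PySem.Dict.empty := by
  induction ts generalizing g s with
  | nil => rfl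
  | cons b ts ih =>
      show pvLoopB (pvColStep (g.insert t PySem.Dict.empty) s b) _ ts = _
      rw [show pvColStep (g.insert t PySem.Dict.empty) s b =
          (pvColStep g s b).insert t PySem.Dict.empty from pvIncFold_insert_fresh b hs ht]
      exact ih
        (fun p hp => by
          rw [pvColStep_contains _ _ hs]
          rcases (PySem.Dict.mem_items_insert _ _ _ _).mp hp with h | ⟨h, _⟩
          · rw [h]; exact hts b (by simp)
          · exact hs p h)
        (fun x hx => by rw [pvColStep_contains _ _ hs]; exact hts x (List.mem_cons_of_mem _ hx))
        (by rw [pvColStep_contains _ _ hs]; exact ht)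

-- ---------- grouped column = positional column ----------

theorem pvIncFold_comm {l : List (String × Int)} {g : PySem.Dict String (PySem.Dict String Int)}
    {x : String} (t : String) (c : Int) (hx : g.contains x = true)
    (hl : ∀ p ∈ l, g.contains p.1 = true) (hne : ∀ p ∈ l, p.1 ≠ x) :
    l.foldl (fun g ac => pvInc g ac.1 t ac.2) (pvInc g x t c) =
      pvInc (l.foldl (fun g ac => pvInc g ac.1 t ac.2) g) x t c := by
  induction l generalizing g with
  | nil => rfl
  | cons p l ih =>
      have hp : g.contains p.1 = true := hl p (by simp)
      rw [List.foldl_cons, List.foldl_cons,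
        show pvInc (pvInc g x t c) p.1 t p.2 = pvInc (pvInc g p.1 t p.2) x t c from
          pvInc_comm_ne _ _ _ _ hx hp (fun h => hne p (by simp) h.symm)]
      exact ih (by rw [pvInc_contains _ _ _ hp]; exact hx)
        (fun q hq => by rw [pvInc_contains _ _ _ hp]; exact hl q (List.mem_cons_of_mem _ hq))
        (fun q hq => hne q (List.mem_cons_of_mem _ hq))

theorem pvGrouped {us : List String} {g : PySem.Dict String (PySem.Dict String Int)}
    (t : String) (hus : ∀ a ∈ us, g.contains a = true) :
    pvColStep g (PySem.Dict.counter us) t = us.foldl (fun g a => pvInc g a t 1) g := by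
  induction us using List.reverseRecOn with
  | nil => rfl
  | append_singleton us x ih =>
      have hus' : ∀ a ∈ us, g.contains a = true :=
        fun a ha => hus a (List.mem_append_left _ ha)
      have hx : g.contains x = true := hus x (List.mem_append_right _ (List.mem_singleton_self x))
      rw [List.foldl_append, List.foldl_cons, List.foldl_nil, ← ih hus']
      unfold pvColStep
      rw [PySem.Dict.items_counter, PySem.Dict.items_counter, PySem.Set.ofList_append_singleton]
      by_cases hmem : x ∈ PySem.Set.ofList us
      · rw [PySem.Set.add_of_mem hmem]
        obtain ⟨S1, S2, hsplit⟩ := List.append_of_mem hmem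
        have hnd : (S1 ++ x :: S2).Nodup := hsplit ▸ PySem.Set.nodup_ofList us
        have hx1 : x ∉ S1 := fun h => (List.disjoint_of_nodup_append hnd) h (by simp)
        have hx2 : x ∉ S2 := (List.nodup_cons.mp (List.nodup_append.mp hnd).2.1).1
        have hmemus : ∀ k, k ∈ S1 ∨ k ∈ S2 → k ∈ us := by
          intro k hk
          have : k ∈ PySem.Set.ofList us := by
            rw [hsplit]
            rcases hk with hk | hk
            · exact List.mem_append_left _ hk
            · exact List.mem_append_right _ (List.mem_cons_of_mem _ hk)
          exact (PySem.Set.mem_ofList ..).mp this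
        have hcount : ∀ k, k ≠ x → (List.count k (us ++ [x]) : Int) = (List.count k us : Int) := by
          intro k hk
          have h0 : List.count k [x] = 0 := List.count_eq_zero.mpr (by simp [hk])
          rw [List.count_append, h0]
          simp
        have hcx : (List.count x (us ++ [x]) : Int) = (List.count x us : Int) + 1 := by
          rw [List.count_append]; simp
        rw [hsplit, List.map_append, List.map_cons, List.map_append, List.map_cons,
          List.foldl_append, List.foldl_cons, List.foldl_append, List.foldl_cons,
          List.map_congr_left (l := S1) (fun k hk => by
            rw [hcount k (fun h => hx1 (h ▸ hk))]),
          List.map_congr_left (l := S2) (fun k hk => by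
            rw [hcount k (fun h => hx2 (h ▸ hk))])]
        show (List.map (fun k => (k, ((List.count k us : Int)))) S2).foldl
            (fun g ac => pvInc g ac.1 t ac.2)
            (pvInc ((List.map (fun k => (k, ((List.count k us : Int)))) S1).foldl
              (fun g ac => pvInc g ac.1 t ac.2) g) x t (List.count x (us ++ [x]) : Int))
          = pvInc ((List.map (fun k => (k, ((List.count k us : Int)))) S2).foldl
              (fun g ac => pvInc g ac.1 t ac.2)
              (pvInc ((List.map (fun k => (k, ((List.count k us : Int)))) S1).foldl
                (fun g ac => pvInc g ac.1 t ac.2) g) x t (List.count x us : Int))) x t 1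
        rw [hcx]
        set g1 := (S1.map (fun k => (k, (List.count k us : Int)))).foldl
          (fun g ac => pvInc g ac.1 t ac.2) g with hg1
        have hg1c : ∀ k, g1.contains k = g.contains k := by
          intro k
          exact pvIncFold_contains _ _ (by
            intro p hp
            obtain ⟨q, hq, hpq⟩ := List.mem_map.mp hp
            rw [← hpq]
            exact hus q (List.mem_append_left _ (hmemus q (Or.inl hq))))
        rw [← pvInc_inc_same g1 x t _]
        exact pvIncFold_comm t 1 (by rw [pvInc_contains _ _ _ (by rw [hg1c]; exact hx), hg1c]; exact hx)
          (by
            intro p hp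
            obtain ⟨q, hq, hpq⟩ := List.mem_map.mp hp
            rw [← hpq, pvInc_contains _ _ _ (by rw [hg1c]; exact hx), hg1c]
            exact hus q (List.mem_append_left _ (hmemus q (Or.inr hq))))
          (by
            intro p hp
            obtain ⟨q, hq, hpq⟩ := List.mem_map.mp hp
            rw [← hpq]
            exact fun h => hx2 (h ▸ hq))
      · rw [PySem.Set.add_of_not_mem hmem, List.map_append, List.foldl_append,
          List.map_congr_left (l := PySem.Set.ofList us) (fun k hk => by
            have hkx : k ≠ x := fun h => hmem (h ▸ hk)
            have h0 : List.count k [x] = 0 := List.count_eq_zero.mpr (by simp [hkx])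
            rw [List.count_append, h0])]
        simp only [List.map_cons, List.map_nil, List.foldl_cons, List.foldl_nil]
        show pvInc ((List.map (fun k => (k, ((List.count k us : Int)))) (PySem.Set.ofList us)).foldl
            (fun g ac => pvInc g ac.1 t ac.2) g) x t (List.count x (us ++ [x]) : Int)
          = pvInc ((List.map (fun k => (k, ((List.count k us : Int)))) (PySem.Set.ofList us)).foldl
            (fun g ac => pvInc g ac.1 t ac.2) g) x t 1
        rw [show (List.count x (us ++ [x]) : Int) = 1 by
          rw [List.count_append,
            List.count_eq_zero.mpr (fun h => hmem ((PySem.Set.mem_ofList ..).mpr h))]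
          simp]

theorem pvAppendCol_simp {us : List String} {g : PySem.Dict String (PySem.Dict String Int)}
    {t : String} (hus : ∀ a ∈ us, g.contains a = true) (ht : g.contains t = true) :
    pvAppendCol g us t = us.foldl (fun g a => pvInc g a t 1) g := by
  induction us generalizing g with
  | nil => rfl
  | cons a us ih =>
      have ha : g.contains a = true := hus a (by simp)
      show pvAppendCol (pvStep g a t) us t = _
      rw [show pvStep g a t = pvInc g a t 1 by
        rw [pvStep, pvEns_of_contains ha, pvEns_of_contains ht]]
      exact ih (fun b hb => by
          rw [pvInc_contains _ _ _ ha]; exact hus b (List.mem_cons_of_mem _ hb))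
        (by rw [pvInc_contains _ _ _ ha]; exact ht)

theorem pvSeen_empty_eq_counter (us : List String) :
    pvSeen PySem.Dict.empty us = PySem.Dict.counter us :=
  PySem.Dict.foldl_insert_getD_add_one_eq_counter us

theorem pvCrux {us : List String} {g : PySem.Dict String (PySem.Dict String Int)}
    (t : String) (hus : ∀ a ∈ us, g.contains a = true) (hne : us ≠ []) :
    pvColStep (pvEns g t) (pvSeen PySem.Dict.empty us) t = pvAppendCol g us t := by
  rw [pvSeen_empty_eq_counter]
  cases us with
  | nil => exact absurd rfl hne
  | cons u us' =>
      have hu : g.contains u = true := hus u (by simp)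
      have ht' : (pvEns g t).contains t = true := by rw [pvEns_contains]; simp
      have hstep : pvStep g u t = pvInc (pvEns g t) u t 1 := by
        rw [pvStep, pvEns_of_contains hu]
      rw [pvGrouped t (fun a ha => by rw [pvEns_contains]; simp [hus a ha]),
        show pvAppendCol g (u :: us') t = pvAppendCol (pvStep g u t) us' t from rfl,
        hstep,
        pvAppendCol_simp (g := pvInc (pvEns g t) u t 1)
          (fun a ha => by
            rw [pvInc_contains _ _ _ (by rw [pvEns_contains]; simp [hu]), pvEns_contains]
            simp [hus a (List.mem_cons_of_mem _ ha)])
          (by rw [pvInc_contains _ _ _ (by rw [pvEns_contains]; simp [hu])]; exact ht'),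
        List.foldl_cons]

-- ---------- init and ensAll ----------

theorem pvEnsAll_contains_mono {g : PySem.Dict String (PySem.Dict String Int)} {k : String}
    (l : List String) (h : g.contains k = true) : (pvEnsAll g l).contains k = true := by
  induction l generalizing g with
  | nil => exact h
  | cons a l ih => exact ih (by rw [pvEns_contains]; simp [h])

theorem pvEnsAll_contains_of_mem {k : String} (g : PySem.Dict String (PySem.Dict String Int))
    {l : List String} (h : k ∈ l) : (pvEnsAll g l).contains k = true := by
  induction l generalizing g with
  | nil => cases h
  | cons a l ih =>
      rcases List.mem_cons.mp h with h | h
      · subst h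
        show (pvEnsAll (pvEns g k) l).contains k = true
        exact pvEnsAll_contains_mono _ (by rw [pvEns_contains]; simp)
      · exact ih _ h

theorem pvEnsAll_contains_sub {g : PySem.Dict String (PySem.Dict String Int)} {k : String}
    {l : List String} (h : (pvEnsAll g l).contains k = true) :
    g.contains k = true ∨ k ∈ l := by
  induction l generalizing g with
  | nil => exact Or.inl h
  | cons a l ih =>
      rcases ih h with h | h
      · rw [pvEns_contains] at h
        rcases Bool.or_eq_true_iff.mp h with h | h
        · exact Or.inr (by simp [beq_iff_eq] at h; simp [h])
        · exact Or.inl h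
      · exact Or.inr (List.mem_cons_of_mem _ h)

theorem pvEnsAll_id {g : PySem.Dict String (PySem.Dict String Int)} {l : List String}
    (h : ∀ a ∈ l, g.contains a = true) : pvEnsAll g l = g := by
  induction l with
  | nil => rfl
  | cons a l ih =>
      show pvEnsAll (pvEns g a) l = g
      rw [pvEns_of_contains (h a (by simp))]
      exact ih (fun b hb => h b (List.mem_cons_of_mem _ hb))

theorem pvInit_contains (ts : List String) (x : String) :
    (pvInit ts).contains x = true ↔ x ∈ ts := by
  rw [PySem.Dict.contains_iff_mem_keys, pvInit, PySem.Dict.keys_foldl_insert]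
  rw [show (PySem.Dict.empty : PySem.Dict String (PySem.Dict String Int)).keys = [] from rfl]
  rw [show PySem.Set.update ([] : List String) ts = PySem.Set.ofList ts from rfl]
  exact PySem.Set.mem_ofList ..

theorem pvInit_append (us : List String) (t : String) :
    pvInit (us ++ [t]) = (pvInit us).insert t PySem.Dict.empty := by
  unfold pvInit
  rw [List.foldl_append, List.foldl_cons, List.foldl_nil]

theorem pvInit_values_empty : ∀ (us : List String), ∀ p ∈ (pvInit us).items,
    p.2 = PySem.Dict.empty := by
  intro us
  induction us using List.reverseRecOn with
  | nil => intro p hp; cases hp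
  | append_singleton us x ih =>
      intro p hp
      rw [pvInit_append] at hp
      cases hc : (pvInit us).contains x with
      | true =>
          rw [PySem.Dict.items_insert_of_contains _ _ hc] at hp
          obtain ⟨q, hq, hpq⟩ := List.mem_map.mp hp
          by_cases h : (q.1 == x) = true
          · rw [if_pos h] at hpq; rw [← hpq]
          · rw [if_neg h] at hpq; rw [← hpq]; exact ih q hq
      | false =>
          rw [PySem.Dict.items_insert_of_not_contains _ _ hc] at hp
          rcases List.mem_append.mp hp with h | h
          · exact ih p h
          · rw [List.mem_singleton.mp h]

theorem pvInit_insert_mem {us : List String} {t : String} (h : t ∈ us) :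
    (pvInit us).insert t PySem.Dict.empty = pvInit us := by
  apply PySem.Dict.ext
  rw [PySem.Dict.items_insert_of_contains _ _ ((pvInit_contains us t).mpr h)]
  conv_rhs => rw [← List.map_id (pvInit us).items]
  apply List.map_congr_left
  intro p hp
  by_cases hx : p.1 = t
  · rw [if_pos (by simp [hx])]
    have hv := pvInit_values_empty us p hp
    cases p with
    | mk k v => simp only at hx hv; rw [hx, hv]; rfl
  · rw [if_neg (by simp [hx])]; rfl

theorem pvAppendCol_contains_mono {g : PySem.Dict String (PySem.Dict String Int)} {k : String}
    (us : List String) (t : String) (h : g.contains k = true) :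
    (pvAppendCol g us t).contains k = true := by
  induction us generalizing g with
  | nil => exact h
  | cons a us ih => exact ih (by rw [pvStep_contains]; simp [h])

theorem pvAppendCol_contains_t (g : PySem.Dict String (PySem.Dict String Int))
    {us : List String} (t : String) (h : us ≠ []) :
    (pvAppendCol g us t).contains t = true := by
  cases us with
  | nil => exact absurd rfl h
  | cons u us =>
      show (pvAppendCol (pvStep g u t) us t).contains t = true
      exact pvAppendCol_contains_mono _ _ (by rw [pvStep_contains]; simp)

-- ---------- MAIN: B's pass = A's loop (up to the ensures of each token) ----------

theorem pvMainQ : ∀ (ts : List String),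
    pvLoopB (pvInit ts) PySem.Dict.empty ts =
      pvEnsAll (pvLoopA PySem.Dict.empty ts) ts := by
  intro ts
  induction ts using List.reverseRecOn with
  | nil => rfl
  | append_singleton us t ih =>
      rw [pvLoopB_append, pvLoopA_append, pvInit_append]
      have hL : pvLoopB ((pvInit us).insert t PySem.Dict.empty) PySem.Dict.empty us
          = pvEns (pvEnsAll (pvLoopA PySem.Dict.empty us) us) t := by
        by_cases hmem : t ∈ us
        · rw [pvInit_insert_mem hmem, ih,
            pvEns_of_contains (pvEnsAll_contains_of_mem _ hmem)]
        · rw [pvLoopB_insert_fresh (by intro p hp; cases hp)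
            (fun x hx => (pvInit_contains us x).mpr hx)
            (by
              cases hc : (pvInit us).contains t with
              | false => rfl
              | true => exact absurd ((pvInit_contains us t).mp hc) hmem), ih]
          rw [pvEns, if_neg (by
            intro hc
            rcases pvEnsAll_contains_sub hc with hcc | hcc
            · rcases pvLoopA_contains_sub hcc with hcc | hcc
              · rw [PySem.Dict.contains_empty] at hcc; cases hcc
              · exact hmem hcc
            · exact hmem hcc)]
      rw [hL]
      rcases us with _ | ⟨u, _ | ⟨v, ws⟩⟩
      · rfl
      · -- us = [u]: both sides are one increment of (u, t) from the two ensured keys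
        have hK : pvAppendCol PySem.Dict.empty [u] t = pvStep PySem.Dict.empty u t := rfl
        have hcu : (pvStep PySem.Dict.empty u t).contains u = true := by
          rw [pvStep_contains]; simp
        have hct : (pvStep PySem.Dict.empty u t).contains t = true := by
          rw [pvStep_contains]; simp
        rw [show pvLoopA PySem.Dict.empty [u] = PySem.Dict.empty from rfl,
          hK, show pvEnsAll (pvStep PySem.Dict.empty u t) ([u] ++ [t])
            = pvEns (pvEns (pvStep PySem.Dict.empty u t) u) t from rfl,
          pvEns_of_contains hcu, pvEns_of_contains hct]
        show pvColStep (pvEns (pvEns PySem.Dict.empty u) t)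
          (PySem.Dict.empty.insert u (PySem.Dict.empty.getD u 0 + 1)) t = _
        unfold pvColStep
        rw [PySem.Dict.items_insert_of_not_contains _ _ (PySem.Dict.contains_empty u)]
        show pvInc (pvEns (pvEns PySem.Dict.empty u) t) u t (PySem.Dict.empty.getD u 0 + 1)
          = pvStep PySem.Dict.empty u t
        rw [PySem.Dict.getD_empty, pvStep]
        norm_num
      · -- us has at least two elements
        have h2 : 2 ≤ (u :: v :: ws).length := by simp
        have hfull := pvLoopA_full h2
        rw [pvEnsAll_id hfull, pvCrux t hfull (by simp),
          pvEnsAll_id (by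
            intro k hk
            rcases List.mem_append.mp hk with hk | hk
            · exact pvAppendCol_contains_mono _ _ (hfull k hk)
            · rw [List.mem_singleton.mp hk]
              exact pvAppendCol_contains_t _ _ (by simp))]

-- ---------- port bridges ----------

theorem pvOuter (tokens : List String) : ∀ (m k : Nat), k + m = tokens.length →
    ∀ g, (PySem.List.pyRange (k : Int) (PySem.List.len tokens) 1).foldl
      (fun graph i => (PySem.List.pyRange (i + 1) (PySem.List.len tokens) 1).foldl
        (fun graph j => pvStep graph (PySem.List.pyGetD tokens i "")
          (PySem.List.pyGetD tokens j "")) graph) g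
      = pvLoopA g (tokens.drop k) := by
  intro m
  induction m with
  | zero =>
      intro k hk g
      rw [PySem.List.pyRange_one_eq_nil (by simp [PySem.List.len_eq]; omega), List.foldl_nil,
        List.drop_of_length_le (by omega)]
      rfl
  | succ m ih =>
      intro k hk g
      have hklt : k < tokens.length := by omega
      rw [PySem.List.pyRange_one_cons (by simp [PySem.List.len_eq]; exact_mod_cast hklt),
        List.foldl_cons]
      rw [show ((k : Int) + 1) = (((k + 1 : Nat)) : Int) by push_cast; ring]
      rw [ih (k + 1) (by omega),
        PySem.List.foldl_pyRange_pyGetD _ _ _ _ (by positivity)]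
      rw [show (((k + 1 : Nat) : Int)).toNat = k + 1 from by omega]
      rw [show PySem.List.pyGetD tokens ((k : Nat) : Int) "" = tokens[k] from by
        rw [PySem.List.pyGetD_natCast]
        exact List.getD_eq_getElem _ _ hklt]
      rw [← List.getElem_cons_drop (as := tokens) (i := k) hklt]
      rfl

theorem portA_eq (tokens : List String) :
    build_cooccurrence_graph tokens =
      (pvLoopA PySem.Dict.empty tokens).items.map (fun p => (p.1, p.2.items)) := by
  show ((PySem.List.pyRange ((0 : Nat) : Int) (PySem.List.len tokens) 1).foldl
      (fun graph i => (PySem.List.pyRange (i + 1) (PySem.List.len tokens) 1).foldl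
        (fun graph j => pvStep graph (PySem.List.pyGetD tokens i "")
          (PySem.List.pyGetD tokens j "")) graph)
      PySem.Dict.empty).items.map (fun p => (p.1, p.2.items)) = _
  rw [pvOuter tokens tokens.length 0 (by omega)]
  rfl

theorem pvPairFold (ts : List String) : ∀ g s,
    (ts.foldl (fun st b =>
      (st.2.items.foldl (fun g ac => pvInc g ac.1 b ac.2) st.1,
       st.2.insert b (st.2.getD b 0 + 1))) (g, s)).1 = pvLoopB g s ts := by
  induction ts with
  | nil => intro g s; rfl
  | cons b ts ih => intro g s; exact ih (pvColStep g s b) (s.insert b (s.getD b 0 + 1))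

theorem portB_eq (tokens : List String) (h : ¬ (PySem.List.len tokens < 2)) :
    build_cooccurrence_graph_alt tokens =
      (pvLoopB (pvInit tokens) PySem.Dict.empty tokens).items.map
        (fun p => (p.1, p.2.items)) := by
  unfold build_cooccurrence_graph_alt
  rw [if_neg h]
  show ((tokens.foldl (fun st b =>
      (st.2.items.foldl (fun g ac => pvInc g ac.1 b ac.2) st.1,
       st.2.insert b (st.2.getD b 0 + 1))) (pvInit tokens, PySem.Dict.empty)).1).items.map
      (fun p => (p.1, p.2.items)) = _
  rw [pvPairFold]

-- ===== VERDICT (by name: the statement is the Claim_ definition above) =====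
theorem build_cooccurrence_graph_spec : Claim_equal_build_cooccurrence_graph := by
  intro tokens _
  show build_cooccurrence_graph tokens = build_cooccurrence_graph_alt tokens
  by_cases hlen : PySem.List.len tokens < 2
  · rw [portA_eq]
    unfold build_cooccurrence_graph_alt
    rw [if_pos hlen]
    rcases tokens with _ | ⟨a, _ | ⟨b, rest⟩⟩
    · rfl
    · rfl
    · exfalso; simp [PySem.List.len_eq] at hlen; omega
  · rw [portA_eq, portB_eq tokens hlen, pvMainQ]
    have h2 : 2 ≤ tokens.length := by
      simp [PySem.List.len_eq] at hlen; exact_mod_cast hlen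
    rw [pvEnsAll_id (pvLoopA_full h2)]
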